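-- pv_equiv track=rewrite | github.com/JayrajSinh16/microByte-round-1b | src/outline_extraction/classifiers/hierarchy_classifier.py | _classify_by_position
-- ===== SOURCE A (Python) =====
-- from typing import List, Dict, Tuple
--
-- def _classify_by_position(heading_blocks: List[Dict]) -> List[str]:
--     """Classify based on document position"""
--     levels = []
--
--     # Group by page
--     page_groups = {}
--     for hb in heading_blocks:
--         page = hb['block'].get('page', 1)
--         if page not in page_groups:
--             page_groups[page] = []
--         page_groups[page].append(hb)
--
--     for hb in heading_blocks:
--         page = hb['block'].get('page', 1)
--         page_headings = page_groups[page]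
--
--         # First heading on a page is often H1
--         if hb == page_headings[0] and page > 1:
--             levels.append('H1')
--         else:
--             # Use indentation
--             x = hb['block'].get('x', 0)
--             if x < 100:
--                 levels.append('H1')
--             elif x < 150:
--                 levels.append('H2')
--             else:
--                 levels.append('H3')
--
--     return levels
-- ===== SOURCE B (Python) =====
-- from typing import List, Dict
--
-- def _classify_by_position(heading_blocks: List[Dict]) -> List[str]:
--     """Classify based on document position (stateless: per-block search for the page leader)."""
--     def indent_level(hb):
--         x = hb['block'].get('x', 0)
--         return 'H1' if x < 100 else ('H2' if x < 150 else 'H3')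
--
--     def level_of(hb):
--         page = hb['block'].get('page', 1)
--         if page > 1:
--             for other in heading_blocks:
--                 if other['block'].get('page', 1) == page:
--                     return 'H1' if hb == other else indent_level(hb)
--         return indent_level(hb)
--
--     return [level_of(hb) for hb in heading_blocks]
-- ===== Notes on version B (the rewrite author's own statement) =====
-- stated objective: alternative
-- what changed: Drops A's mutable grouping pass (dict of per-page lists) and second scan entirely: B is stateless and classifies each block independently by a linear search for the first block sharing its page, then the same indentation bands.
import Mathlib
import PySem

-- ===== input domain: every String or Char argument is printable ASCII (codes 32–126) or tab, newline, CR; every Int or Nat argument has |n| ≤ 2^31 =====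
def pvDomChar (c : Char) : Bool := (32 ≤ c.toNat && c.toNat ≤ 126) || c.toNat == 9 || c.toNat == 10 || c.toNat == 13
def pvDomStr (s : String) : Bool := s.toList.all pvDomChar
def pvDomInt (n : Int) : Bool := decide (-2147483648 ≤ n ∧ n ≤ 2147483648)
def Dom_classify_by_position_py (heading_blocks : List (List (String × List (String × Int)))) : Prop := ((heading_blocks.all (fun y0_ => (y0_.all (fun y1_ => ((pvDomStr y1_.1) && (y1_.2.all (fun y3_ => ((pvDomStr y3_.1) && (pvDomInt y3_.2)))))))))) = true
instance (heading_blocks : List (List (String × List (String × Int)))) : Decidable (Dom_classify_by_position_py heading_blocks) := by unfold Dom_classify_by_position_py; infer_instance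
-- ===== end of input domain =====

-- B drops A's mutable grouping pass (dict of per-page lists) and second scan: it is stateless and
-- classifies each block independently by a linear search for the first block sharing its page.
-- Python dict '==' is ported as key-set + lookup equality (order-independent), exact for the
-- assoc-list encoding of dicts.

-- ----- shared helpers: dict lookup and Python's order-independent dict equality -----
-- first-match lookup in an assoc list (the encoding of d.get(k) / d[k])
def pvLk {α : Type} (d : List (String × α)) (k : String) : Option α :=
  (d.find? (fun p => p.1 == k)).map (fun p => p.2)

-- Python '==' on the inner dict (str -> int): same lookups on both key sets
def pvInnerEq (a b : List (String × Int)) : Bool :=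
  (a.all (fun p => pvLk a p.1 == pvLk b p.1)) && (b.all (fun p => pvLk a p.1 == pvLk b p.1))

def pvOptInnerEq (o₁ o₂ : Option (List (String × Int))) : Bool :=
  match o₁, o₂ with
  | none, none => true
  | some v, some w => pvInnerEq v w
  | _, _ => false

-- Python '==' on a heading block hb : dict[str, dict[str, int]]
def pvHbEq (a b : List (String × List (String × Int))) : Bool :=
  (a.all (fun p => pvOptInnerEq (pvLk a p.1) (pvLk b p.1))) &&
  (b.all (fun p => pvOptInnerEq (pvLk a p.1) (pvLk b p.1)))

-- hb['block']  (KeyError when absent: excluded by Pre_; [] is never reached inside Pre_)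
def pvBlockOf (hb : List (String × List (String × Int))) : List (String × Int) :=
  (pvLk hb "block").getD []

-- hb['block'].get('page', 1)
def pvPageOf (hb : List (String × List (String × Int))) : Int :=
  (pvLk (pvBlockOf hb) "page").getD 1

-- hb['block'].get('x', 0)
def pvXOf (hb : List (String × List (String × Int))) : Int :=
  (pvLk (pvBlockOf hb) "x").getD 0

-- ===== PORT A =====
-- step of A's grouping loop: page_groups[page] = [] if absent, then .append(hb)
def pvStepA (g : PySem.Dict Int (List (List (String × List (String × Int)))))
    (hb : List (String × List (String × Int))) :
    PySem.Dict Int (List (List (String × List (String × Int)))) :=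
  let page := pvPageOf hb
  let g := if g.contains page then g else g.insert page []
  g.modify page [] (fun l => l ++ [hb])

-- step of A's second loop (classification against the finished page_groups dict)
def pvStepA2 (page_groups : PySem.Dict Int (List (List (String × List (String × Int)))))
    (levels : List String) (hb : List (String × List (String × Int))) : List String :=
  let page := pvPageOf hb
  let page_headings := (page_groups.get? page).getD []
  if pvHbEq hb ((PySem.List.pyGet? page_headings 0).getD []) && page > 1 then
    levels ++ ["H1"]
  else
    let x := pvXOf hb
    if x < 100 then levels ++ ["H1"]
    else if x < 150 then levels ++ ["H2"]
    else levels ++ ["H3"]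

def classify_by_position_py (heading_blocks : List (List (String × List (String × Int)))) : List String :=
  let page_groups := heading_blocks.foldl pvStepA PySem.Dict.empty
  heading_blocks.foldl (pvStepA2 page_groups) []

-- ===== PORT B =====
-- indent_level(hb)
def pvIndentLevel (hb : List (String × List (String × Int))) : String :=
  if pvXOf hb < 100 then "H1" else if pvXOf hb < 150 then "H2" else "H3"

-- level_of(hb): the inner for-loop returning at the first block on hb's page
def pvLevelOf (heading_blocks : List (List (String × List (String × Int))))
    (hb : List (String × List (String × Int))) : String :=
  let page := pvPageOf hb
  if page > 1 then
    match heading_blocks.find? (fun other => pvPageOf other == page) with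
    | some leader => if pvHbEq hb leader then "H1" else pvIndentLevel hb
    | none => pvIndentLevel hb  -- loop falls through (unreachable when hb is from the list)
  else pvIndentLevel hb

def classify_by_position_py_alt (heading_blocks : List (List (String × List (String × Int)))) : List String :=
  heading_blocks.map (pvLevelOf heading_blocks)

-- ===== PRECONDITION & SPEC =====
-- Pre_ excludes exactly the inputs with a heading block lacking the 'block' key, on which A raises KeyError.
def Pre_classify_by_position_py (heading_blocks : List (List (String × List (String × Int)))) : Prop :=
  (heading_blocks.all (fun hb => hb.any (fun p => p.1 == "block"))) = true
instance (heading_blocks : List (List (String × List (String × Int)))) : Decidable (Pre_classify_by_position_py heading_blocks) := by unfold Pre_classify_by_position_py; infer_instance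

def pvWitness_classify_by_position_py : (List (List (String × List (String × Int)))) :=
  [[("block", [("page", 1), ("x", 50)])], [("block", [("page", 2), ("x", 160)])]]

def Spec_classify_by_position_py (heading_blocks : List (List (String × List (String × Int)))) (out : List String) : Prop := out = classify_by_position_py_alt heading_blocks
instance (heading_blocks : List (List (String × List (String × Int)))) (out : List String) : Decidable (Spec_classify_by_position_py heading_blocks out) := by unfold Spec_classify_by_position_py; infer_instance

-- ===== CLAIM (what is proved, stated in full; the proofs are below) =====
def Claim_equal_classify_by_position_py : Prop := ∀ (heading_blocks : List (List (String × List (String × Int)))), Dom_classify_by_position_py heading_blocks → Pre_classify_by_position_py heading_blocks → Spec_classify_by_position_py heading_blocks (classify_by_position_py heading_blocks)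

-- ===== LEMMAS AND PROOFS =====

-- the level A's second loop assigns to hb, given the finished page_groups dict G
def pvLvlA (G : PySem.Dict Int (List (List (String × List (String × Int)))))
    (hb : List (String × List (String × Int))) : String :=
  if pvHbEq hb ((PySem.List.pyGet? ((G.get? (pvPageOf hb)).getD []) 0).getD []) && pvPageOf hb > 1 then "H1"
  else if pvXOf hb < 100 then "H1" else if pvXOf hb < 150 then "H2" else "H3"

theorem pvStepA2_eq (G : PySem.Dict Int (List (List (String × List (String × Int)))))
    (acc : List String) (hb : List (String × List (String × Int))) :
    pvStepA2 G acc hb = acc ++ [pvLvlA G hb] := by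
  simp only [pvStepA2, pvLvlA]
  split_ifs <;> rfl

theorem pvFoldA (G : PySem.Dict Int (List (List (String × List (String × Int)))))
    (l : List (List (String × List (String × Int)))) (acc : List String) :
    l.foldl (pvStepA2 G) acc = acc ++ l.map (pvLvlA G) := by
  induction l generalizing acc with
  | nil => simp
  | cons hb t ih => rw [List.foldl_cons, pvStepA2_eq, ih]; simp

theorem pvPortA_eq (hbs : List (List (String × List (String × Int)))) :
    classify_by_position_py hbs = hbs.map (pvLvlA (hbs.foldl pvStepA PySem.Dict.empty)) := by
  show hbs.foldl (pvStepA2 (hbs.foldl pvStepA PySem.Dict.empty)) [] = _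
  rw [pvFoldA]; rfl

theorem pvStepA_getD (g : PySem.Dict Int (List (List (String × List (String × Int)))))
    (hb : List (String × List (String × Int))) (p : Int) :
    ((pvStepA g hb).get? p).getD [] =
      if pvPageOf hb = p then ((g.get? p).getD []) ++ [hb] else (g.get? p).getD [] := by
  simp only [pvStepA, ← PySem.Dict.getD_eq_get?_getD]
  by_cases hc : g.contains (pvPageOf hb)
  · simp only [hc, if_true, PySem.Dict.getD_modify]
    by_cases h : pvPageOf hb = p
    · simp [h]
    · simp [h, Ne.symm h]
  · have hg : g.getD (pvPageOf hb) ([] : List (List (String × List (String × Int)))) = [] := by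
      rw [PySem.Dict.getD_eq_get?_getD]
      rw [PySem.Dict.contains_eq_isSome_get?] at hc
      rcases h' : g.get? (pvPageOf hb) with _ | v
      · rfl
      · rw [h'] at hc; simp at hc
    simp only [hc, Bool.false_eq_true, if_false, PySem.Dict.getD_modify, PySem.Dict.getD_insert]
    by_cases h : pvPageOf hb = p
    · subst h
      simp [hg]
    · simp [h, Ne.symm h]

theorem pvGroupsA_getD (l : List (List (String × List (String × Int))))
    (g : PySem.Dict Int (List (List (String × List (String × Int))))) (p : Int) :
    ((l.foldl pvStepA g).get? p).getD [] =
      ((g.get? p).getD []) ++ (l.filter (fun hb => pvPageOf hb == p)) := by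
  induction l generalizing g with
  | nil => simp
  | cons hb t ih =>
    rw [List.foldl_cons, ih, pvStepA_getD, List.filter_cons]
    by_cases h : pvPageOf hb = p <;> simp [h]

theorem pvFind?_eq_head?_filter {α : Type} (p : α → Bool) (l : List α) :
    l.find? p = (l.filter p).head? := by
  induction l with
  | nil => rfl
  | cons x t ih =>
    rw [List.find?_cons, List.filter_cons]
    cases hpx : p x with
    | false => simp only [List.head?]; exact ih
    | true => simp

theorem pvPyGet0 {α : Type} (l : List α) : PySem.List.pyGet? l 0 = l.head? := by
  rw [PySem.List.pyGet?_zero]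
  cases l <;> simp

-- on every member of the list, A's table-driven level equals B's search-driven level
theorem pvLvl_eq (hbs : List (List (String × List (String × Int))))
    (hb : List (String × List (String × Int))) (hmem : hb ∈ hbs) :
    pvLvlA (hbs.foldl pvStepA PySem.Dict.empty) hb = pvLevelOf hbs hb := by
  have hfind : ∃ leader, hbs.find? (fun other => pvPageOf other == pvPageOf hb) = some leader := by
    apply Option.isSome_iff_exists.mp
    exact List.find?_isSome.mpr ⟨hb, hmem, by simp⟩
  rcases hfind with ⟨leader, hleader⟩
  unfold pvLvlA pvLevelOf
  rw [pvGroupsA_getD, pvPyGet0]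
  simp only [PySem.Dict.get?_empty, Option.getD_none, List.nil_append]
  rw [← pvFind?_eq_head?_filter, hleader]
  simp only [Option.getD_some]
  by_cases hp : pvPageOf hb > 1 <;> simp [hp, pvIndentLevel]

-- ===== VERDICT (by name: the statement is the Claim_ definition above) =====
theorem classify_by_position_py_spec : Claim_equal_classify_by_position_py := by
  intro hbs _ _
  unfold Spec_classify_by_position_py classify_by_position_py_alt
  rw [pvPortA_eq]
  exact List.map_congr_left (fun hb hmem => pvLvl_eq hbs hb hmem)
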